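-- pv_equiv track=rewrite | github.com/azorg/esp_sx128x | lib/sx128x/sandbox/sx128x_preamble.py | pack_preamble
-- ===== SOURCE A (Python) =====
-- def pack_preamble(preamble):
--     mant = preamble
--     exp = 0
--
--     if 0:
--         mant >>= 1
--         exp += 1
--
--     while mant > 15:
--         mant >>= 1
--         exp += 1
--         if exp >= 15: break
--
--     if mant > 15: mant = 15
--
--     preamble = mant * (1 << exp)
--     pack = (exp << 4) | mant
--     return mant, exp, pack, preamble
-- ===== SOURCE B (Python) =====
-- def pack_preamble(preamble):
--     if preamble <= 15:
--         mant, exp = preamble, 0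
--     else:
--         exp = min(preamble.bit_length() - 4, 15)
--         mant = preamble >> exp
--         if mant > 15:
--             mant = 15
--     preamble = mant * (1 << exp)
--     pack = (exp << 4) | mant
--     return mant, exp, pack, preamble
-- ===== Notes on version B (the rewrite author's own statement) =====
-- stated objective: idiomatic
-- what changed: replaces the shift-one-bit-per-iteration while loop by a closed-form exponent computed from bit_length (exp = min(bit_length-4, 15)), with a single shift and clamp
import Mathlib
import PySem

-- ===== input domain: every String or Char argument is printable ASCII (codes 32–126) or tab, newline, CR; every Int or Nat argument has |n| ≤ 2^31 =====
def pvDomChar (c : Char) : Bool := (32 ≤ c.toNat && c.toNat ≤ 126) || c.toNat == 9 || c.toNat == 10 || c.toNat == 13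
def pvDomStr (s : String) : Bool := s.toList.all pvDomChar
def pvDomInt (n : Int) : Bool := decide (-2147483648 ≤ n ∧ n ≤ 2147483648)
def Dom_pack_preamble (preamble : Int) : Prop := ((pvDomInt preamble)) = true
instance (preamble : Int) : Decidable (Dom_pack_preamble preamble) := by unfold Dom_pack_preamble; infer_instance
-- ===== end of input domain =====

-- B replaces A's shift-one-bit-per-iteration loop by a closed-form exponent from bit_length (idiomatic; equivalence proved for all Int).

-- ===== PORT A =====
-- the 'if 0:' block in A is dead code and is omitted; exp stays ≥ 0 throughout,
-- so Python's '1 << exp' / 'exp << 4' are '(1:Int) <<< exp.toNat' / 'exp <<< 4'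
def pvLoopA (mant exp : Int) : Int × Int :=
  if 15 < mant then
    let m := mant >>> (1 : Nat)
    let e := exp + 1
    if 15 ≤ e then (m, e) else pvLoopA m e
  else (mant, exp)
termination_by (15 - exp).toNat
decreasing_by omega

def pack_preamble (preamble : Int) : Int × Int × Int × Int :=
  let me := pvLoopA preamble 0
  let mant0 := me.1
  let exp := me.2
  let mant := if 15 < mant0 then 15 else mant0
  let preamble2 := mant * ((1 : Int) <<< exp.toNat)
  let pack := PySem.Int.bor (exp <<< (4 : Nat)) mant
  (mant, exp, pack, preamble2)

-- ===== PORT B =====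
def pack_preamble_alt (preamble : Int) : Int × Int × Int × Int :=
  let me :=
    if preamble ≤ 15 then (preamble, (0 : Int))
    else
      let exp : Int := min ((PySem.Int.bitLength preamble : Int) - 4) 15
      let mant := preamble >>> exp.toNat
      (if 15 < mant then 15 else mant, exp)
  let mant := me.1
  let exp := me.2
  (mant, exp, PySem.Int.bor (exp <<< (4 : Nat)) mant, mant * ((1 : Int) <<< exp.toNat))

-- ===== PRECONDITION & SPEC =====
def Spec_pack_preamble (preamble : Int) (out : Int × Int × Int × Int) : Prop := out = pack_preamble_alt preamble
instance (preamble : Int) (out : Int × Int × Int × Int) : Decidable (Spec_pack_preamble preamble out) := by unfold Spec_pack_preamble; infer_instance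

-- ===== CLAIM (what is proved, stated in full; the proofs are below) =====
def Claim_equal_pack_preamble : Prop := ∀ (preamble : Int), Dom_pack_preamble preamble → Spec_pack_preamble preamble (pack_preamble preamble)

-- ===== LEMMAS AND PROOFS =====

-- bit-length lower bound from a lower bound on the value
lemma pvBL_ge (m : Int) (h : 16 ≤ m) : 5 ≤ PySem.Int.bitLength m := by
  by_contra hc
  have h1 := PySem.Int.lt_two_pow_bitLength m
  have h2 : 2 ^ PySem.Int.bitLength m ≤ 2 ^ 4 :=
    Nat.pow_le_pow_right (by norm_num) (by omega)
  have h3 : (16 : Nat) ≤ m.natAbs := by omega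
  simp at h2
  omega

lemma pvBL_ge6 (m : Int) (h : 32 ≤ m) : 6 ≤ PySem.Int.bitLength m := by
  by_contra hc
  have h1 := PySem.Int.lt_two_pow_bitLength m
  have h2 : 2 ^ PySem.Int.bitLength m ≤ 2 ^ 5 :=
    Nat.pow_le_pow_right (by norm_num) (by omega)
  have h3 : (32 : Nat) ≤ m.natAbs := by omega
  simp at h2
  omega

lemma pvBL_le5 (m : Int) (h0 : 0 ≤ m) (h : m ≤ 31) : PySem.Int.bitLength m ≤ 5 := by
  by_contra hc
  have h1 := PySem.Int.two_pow_bitLength_le m (by intro h'; subst h'; simp at hc)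
  have h2 : 2 ^ 5 ≤ 2 ^ (PySem.Int.bitLength m - 1) :=
    Nat.pow_le_pow_right (by norm_num) (by omega)
  have h3 : m.natAbs ≤ 31 := by omega
  simp at h2
  omega

-- halving a positive Int drops its bit length by one
lemma pvBL_shift (m : Int) (h : 0 < m) :
    PySem.Int.bitLength m = PySem.Int.bitLength (m >>> (1 : Nat)) + 1 := by
  have := PySem.Int.bitLength_of_pos (n := m) h
  rw [this]
  congr 2
  rw [PySem.Int.floordiv_eq_ediv_of_pos (by norm_num), Int.shiftRight_eq_div_pow]
  norm_num

-- m >>> 1 ≤ 15 forces m ≤ 31 (for 0 < m)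
lemma pvShift_le (m : Int) (hle : m >>> (1 : Nat) ≤ 15) : m ≤ 31 := by
  rw [Int.shiftRight_eq_div_pow] at hle
  omega

lemma pvShift_gt (m : Int) (h : 0 < m) (hgt : 15 < m >>> (1 : Nat)) : 32 ≤ m := by
  rw [Int.shiftRight_eq_div_pow] at hgt
  omega

-- closed form of A's loop
lemma pvLoopA_spec (f : Nat) (m e : Int) (hm : 15 < m) (he : 0 ≤ e) (hlt : e < 15)
    (hf : (15 - e).toNat = f) :
    pvLoopA m e =
      (m >>> min (PySem.Int.bitLength m - 4) (15 - e).toNat,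
       e + min (PySem.Int.bitLength m - 4) (15 - e).toNat) := by
  induction f generalizing m e with
  | zero => omega
  | succ f ih =>
    have hBL : 5 ≤ PySem.Int.bitLength m := pvBL_ge m (by omega)
    rw [pvLoopA]
    simp only [hm, if_true]
    by_cases h15 : 15 ≤ e + 1
    · -- e = 14 : last allowed iteration
      have he14 : e = 14 := by omega
      simp only [h15, if_true]
      have : min (PySem.Int.bitLength m - 4) (15 - e).toNat = 1 := by
        subst he14; simp; omega
      rw [this, he14]
      norm_num
    · simp only [h15, if_false]
      by_cases hsm : 15 < m >>> (1 : Nat)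
      · -- still too large: recurse, bit length drops by one
        have h32 : 32 ≤ m := pvShift_gt m (by omega) hsm
        have hBL6 : 6 ≤ PySem.Int.bitLength m := pvBL_ge6 m h32
        have hrec := ih (m >>> (1 : Nat)) (e + 1) hsm (by omega) (by omega) (by omega)
        rw [hrec]
        have hbl : PySem.Int.bitLength (m >>> (1 : Nat)) = PySem.Int.bitLength m - 1 := by
          have := pvBL_shift m (by omega); omega
        have hmin : min (PySem.Int.bitLength (m >>> (1 : Nat)) - 4) (15 - (e + 1)).toNat + 1
            = min (PySem.Int.bitLength m - 4) (15 - e).toNat := by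
          rw [hbl]; omega
        rw [Prod.mk.injEq]
        constructor
        · rw [← Int.shiftRight_add]
          congr 1
          omega
        · omega
      · -- one shift was enough: m ≤ 31, bit length exactly 5
        have h31 : m ≤ 31 := pvShift_le m (by omega)
        have hBL5 : PySem.Int.bitLength m = 5 := by
          have := pvBL_le5 m (by omega) h31; omega
        rw [pvLoopA]
        simp only [hsm, if_false]
        have : min (PySem.Int.bitLength m - 4) (15 - e).toNat = 1 := by
          rw [hBL5]; omega
        rw [this]
        norm_num

-- ===== VERDICT (by name: the statement is the Claim_ definition above) =====
theorem pack_preamble_spec : Claim_equal_pack_preamble := by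
  intro p _
  unfold Spec_pack_preamble pack_preamble pack_preamble_alt
  by_cases hp : p ≤ 15
  · -- small / negative: loop body never runs and B's first branch fires
    rw [pvLoopA]
    simp [hp, not_lt.mpr hp]
  · rw [not_le] at hp
    have hBL : 5 ≤ PySem.Int.bitLength p := pvBL_ge p (by omega)
    have hloop := pvLoopA_spec 15 p 0 hp (by norm_num) (by norm_num) (by decide)
    have h150 : (15 - (0 : Int)).toNat = 15 := by decide
    rw [h150] at hloop
    rw [hloop]
    simp only [not_le.mpr hp, if_false, zero_add]
    -- B's exponent equals the loop's iteration count
    have hK : min ((PySem.Int.bitLength p : Int) - 4) 15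
        = ((min (PySem.Int.bitLength p - 4) 15 : Nat) : Int) := by omega
    have hKt : (min ((PySem.Int.bitLength p : Int) - 4) 15).toNat
        = min (PySem.Int.bitLength p - 4) 15 := by omega
    rw [hKt, hK, Int.toNat_natCast]
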